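/- GENERATED by farm/mkstatement.py from design/units.tsv (unit `start_decoder.C2d`) and the assertions of Vorbis/Spec/StartDecoderC2.lean — do not edit.
   THE STATEMENT of the proof unit `start_decoder.C2d`: segment C2d of `start_decoder` (16 instructions; entries 0x1144c2;
   exits 0x113b22,0x1144ee,0x1147c3; ranges 0x1144c2-0x1144d2 + 0x1143fb-0x114410 + 0x1144d7-0x1144e9)
   takes each of its entry assertions to one of its exit assertions (`Vorbis.Spec.StartDecoder.SegC2d`), given the contracts of its callees.
   What the names mean: Vorbis/Spec/Basic.lean (the shared hypotheses), Vorbis/Spec/StartDecoderC2.lean (the assertions). The theorem to prove: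
   `theorem start_decoder_C2d_ok : Vorbis.Spec.start_decoder_C2d.Statement`. -/
import Vorbis.Spec.Leaves
import Vorbis.Spec.StartDecoderC2
namespace Vorbis.Spec.start_decoder_C2d
open X86 X86.User Asan

/-- The statement of unit `start_decoder.C2d`. -/
def Statement : Prop :=
  ∀ (Lay : Layout) (_hLay : Lay.hi = 0x1000000) (μ : Microarch) (_hμ : UserX.MicroOK μ) (u₀ : State)
    (_hcode : HasCodeNat Lay u₀ Vorbis.L.start_decoder.entry Vorbis.Code.code_start_decoder.nat Vorbis.L.start_decoder.size)
    (_h_error : ∀ (others : List Obj) (frames : List (Nat × FrameLayout)), Calls Lay μ Vorbis.WayInv (Vorbis.conv u₀) Vorbis.L.error.entry (Vorbis.Spec.error.spec others frames))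
    (_h_asan_store8_noabort : Asan.SmallCheck Lay μ Vorbis.WayInv (Vorbis.CodeOK u₀) [.rax, .rcx, .rdx] 8 Vorbis.L.__asan_store8_noabort.entry),
    Vorbis.Spec.StartDecoder.SegC2d Lay μ u₀

end Vorbis.Spec.start_decoder_C2d
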